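-- pv_equiv track=rewrite | github.com/cnshsliu/aivideo | main.py | _split_by_punctuation
-- ===== SOURCE A (Python) =====
-- def _split_by_punctuation(text, punctuation_char):
--     """Split text by punctuation character, preserving the punctuation in the result"""
--     parts = []
--     current_part = ""
--
--     for char in text:
--         current_part += char
--         if char == punctuation_char:
--             parts.append(current_part)
--             current_part = ""
--
--     # Add remaining part
--     if current_part.strip():
--         parts.append(current_part)
--
--     return parts
-- ===== SOURCE B (Python) =====
-- def _split_by_punctuation(text, punctuation_char):
--     """Split text by punctuation character, preserving the punctuation in the result."""
--     parts = []
--     rest = text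
--     while True:
--         cut = next((i for i, c in enumerate(rest) if c == punctuation_char), None)
--         if cut is None:
--             break
--         parts.append(rest[:cut + 1])
--         rest = rest[cut + 1:]
--     if rest.strip():
--         parts.append(rest)
--     return parts
-- ===== Notes on version B (the rewrite author's own statement) =====
-- stated objective: alternative
-- what changed: Replaced A's char-by-char accumulation into a growing current_part with a repeated find-first-delimiter-index-and-slice loop over the remaining suffix.
import Mathlib
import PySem

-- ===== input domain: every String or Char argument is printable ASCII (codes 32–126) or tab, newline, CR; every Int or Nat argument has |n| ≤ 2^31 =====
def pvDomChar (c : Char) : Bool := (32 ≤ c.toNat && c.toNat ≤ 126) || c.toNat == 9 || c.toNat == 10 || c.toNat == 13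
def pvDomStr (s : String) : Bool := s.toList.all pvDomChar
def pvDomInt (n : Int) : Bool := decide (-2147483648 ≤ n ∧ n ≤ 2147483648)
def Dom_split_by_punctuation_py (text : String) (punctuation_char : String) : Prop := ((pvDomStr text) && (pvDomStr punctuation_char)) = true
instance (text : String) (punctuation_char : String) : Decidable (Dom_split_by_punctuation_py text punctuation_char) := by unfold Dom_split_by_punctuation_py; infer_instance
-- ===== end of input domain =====

-- B replaces A's char-by-char accumulation with a repeated find-first-delimiter-and-slice loop (objective: alternative decomposition, same cost).

-- ===== PORT A =====
-- A: fold over the characters accumulating (parts, current_part); flush current_part when the char equals punctuation_char.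
def split_by_punctuation_py (text : String) (punctuation_char : String) : List String :=
  let p := punctuation_char.toList
  let st := text.toList.foldl
    (fun (st : List String × List Char) c =>
      let cur := st.2 ++ [c]
      if [c] = p then (st.1 ++ [String.mk cur], []) else (st.1, cur))
    ([], [])
  if PySem.Chars.strip st.2 ≠ [] then st.1 ++ [String.mk st.2] else st.1

-- ===== PORT B =====
-- B's while loop: find the first index whose char equals punctuation_char, slice off text[:cut+1], repeat on the rest.
def pvAltLoop (p : List Char) (parts : List (List Char)) (rest : List Char) :
    List (List Char) × List Char :=
  match h : rest.findIdx? (fun c => decide ([c] = p)) with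
  | some cut => pvAltLoop p (parts ++ [rest.take (cut + 1)]) (rest.drop (cut + 1))
  | none => (parts, rest)
termination_by rest.length
decreasing_by
  have hlt : cut < rest.length := (List.findIdx?_eq_some_iff_findIdx_eq.mp h).1
  simpa using Nat.sub_lt (Nat.lt_of_le_of_lt (Nat.zero_le _) hlt) (Nat.succ_pos cut)

def split_by_punctuation_py_alt (text : String) (punctuation_char : String) : List String :=
  let r := pvAltLoop punctuation_char.toList [] text.toList
  (if PySem.Chars.strip r.2 ≠ [] then r.1 ++ [r.2] else r.1).map String.mk

-- ===== PRECONDITION & SPEC =====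
def Spec_split_by_punctuation_py (text : String) (punctuation_char : String) (out : List String) : Prop := out = split_by_punctuation_py_alt text punctuation_char
instance (text : String) (punctuation_char : String) (out : List String) : Decidable (Spec_split_by_punctuation_py text punctuation_char out) := by unfold Spec_split_by_punctuation_py; infer_instance

-- ===== CLAIM (what is proved, stated in full; the proofs are below) =====
def Claim_equal_split_by_punctuation_py : Prop := ∀ (text : String) (punctuation_char : String), Dom_split_by_punctuation_py text punctuation_char → Spec_split_by_punctuation_py text punctuation_char (split_by_punctuation_py text punctuation_char)

-- ===== LEMMAS AND PROOFS =====

-- Common reference: A's recursion restated structurally over the char list.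
def pvSegs (p : List Char) (cur : List Char) : List Char → List (List Char)
  | [] => if PySem.Chars.strip cur ≠ [] then [cur] else []
  | c :: t => if [c] = p then (cur ++ [c]) :: pvSegs p [] t else pvSegs p (cur ++ [c]) t

theorem pvFoldA_eq (p : List Char) (l : List Char) :
    ∀ (parts : List String) (cur : List Char),
      (fun st : List String × List Char =>
        if PySem.Chars.strip st.2 ≠ [] then st.1 ++ [String.mk st.2] else st.1)
        (l.foldl
          (fun (st : List String × List Char) c =>
            let cur := st.2 ++ [c]
            if [c] = p then (st.1 ++ [String.mk cur], []) else (st.1, cur))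
          (parts, cur))
      = parts ++ (pvSegs p cur l).map String.mk := by
  induction l with
  | nil => intro parts cur; by_cases h : PySem.Chars.strip cur = [] <;> simp [pvSegs, h]
  | cons c t ih =>
      intro parts cur
      by_cases h : [c] = p
      · simp only [List.foldl_cons, pvSegs, h, ih]
        simp [List.append_assoc]
      · simp only [List.foldl_cons, pvSegs, h, ih]
        simp

theorem pvSegs_eq_find (p : List Char) (l : List Char) :
    ∀ (cur : List Char),
      pvSegs p cur l =
        match l.findIdx? (fun c => decide ([c] = p)) with
        | some i => (cur ++ l.take (i + 1)) :: pvSegs p [] (l.drop (i + 1))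
        | none => if PySem.Chars.strip (cur ++ l) ≠ [] then [cur ++ l] else [] := by
  induction l with
  | nil => intro cur; simp [pvSegs]
  | cons c t ih =>
      intro cur
      by_cases h : [c] = p
      · simp [pvSegs, h, List.findIdx?_cons]
      · have hf : (c :: t).findIdx? (fun c => decide ([c] = p)) =
            (t.findIdx? (fun c => decide ([c] = p))).map (· + 1) := by
          simp [List.findIdx?_cons, h]
        rw [show pvSegs p cur (c :: t) = pvSegs p (cur ++ [c]) t from by simp [pvSegs, h], ih, hf]
        cases hft : t.findIdx? (fun c => decide ([c] = p)) with
        | none => simp [List.append_assoc]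
        | some i => simp [List.append_assoc, List.take_succ_cons, List.drop_succ_cons]

theorem pvAltLoop_eq (p : List Char) (rest : List Char) :
    ∀ (parts : List (List Char)),
      (fun r : List (List Char) × List Char =>
        if PySem.Chars.strip r.2 ≠ [] then r.1 ++ [r.2] else r.1) (pvAltLoop p parts rest)
      = parts ++ pvSegs p [] rest := by
  induction hn : rest.length using Nat.strong_induction_on generalizing rest with
  | _ n ih =>
    intro parts
    rw [pvAltLoop]
    cases h : rest.findIdx? (fun c => decide ([c] = p)) with
    | none =>
        rw [pvSegs_eq_find, h]
        by_cases hs : PySem.Chars.strip rest = [] <;> simp [hs]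
    | some cut =>
        have hlt : cut < rest.length := (List.findIdx?_eq_some_iff_findIdx_eq.mp h).1
        have hdrop : (rest.drop (cut + 1)).length < n := by
          subst hn; simp; omega
        rw [ih _ hdrop _ rfl]
        rw [pvSegs_eq_find p rest, h]
        simp [List.append_assoc]

-- ===== VERDICT (by name: the statement is the Claim_ definition above) =====
theorem split_by_punctuation_py_spec : Claim_equal_split_by_punctuation_py := by
  intro text punctuation_char _
  unfold Spec_split_by_punctuation_py split_by_punctuation_py split_by_punctuation_py_alt
  have hA := pvFoldA_eq punctuation_char.toList text.toList [] []
  have hB := pvAltLoop_eq punctuation_char.toList text.toList []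
  simp only [List.nil_append] at hA hB
  dsimp only
  rw [hA, hB]
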